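-- pv_equiv track=rewrite | github.com/automationhacks/programming-challenges | src/test/python/4_duplicate_chars_in_string.py | find_duplicate_chars
-- ===== SOURCE A (Python) =====
-- def find_duplicate_chars(strng):
--     """
--     Logic:
--     enumerate(string) returns a iterable with tuple of pos and char of string
--     :param strng: input string
--     :return: dict with key as char and value as list of all indexes
--     """
--     mapping = {}
--
--     for pos, char in enumerate(strng.lower()):
--         if char in mapping.keys():
--             mapping[char].append(str(pos))
--         else:
--             mapping[char] = []
--     return mapping
-- ===== SOURCE B (Python) =====
-- def find_duplicate_chars(strng):
--     s = strng.lower()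
--     # Outer loop over the distinct chars (first-occurrence order); for each,
--     # an inner scan collects all its positions, then drop the first one.
--     return {c: [str(p) for p, ch in enumerate(s) if ch == c][1:]
--             for c in dict.fromkeys(s)}
-- ===== Notes on version B (the rewrite author's own statement) =====
-- stated objective: alternative
-- what changed: Replaces A's single-pass stateful dict build (branch on key presence, append str(pos) or seed []) with a per-character nested scan: a dict comprehension over the distinct lowercased chars (dict.fromkeys order) where each char's value is recomputed by a full inner scan of the string, dropping the first occurrence.
import Mathlib
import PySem

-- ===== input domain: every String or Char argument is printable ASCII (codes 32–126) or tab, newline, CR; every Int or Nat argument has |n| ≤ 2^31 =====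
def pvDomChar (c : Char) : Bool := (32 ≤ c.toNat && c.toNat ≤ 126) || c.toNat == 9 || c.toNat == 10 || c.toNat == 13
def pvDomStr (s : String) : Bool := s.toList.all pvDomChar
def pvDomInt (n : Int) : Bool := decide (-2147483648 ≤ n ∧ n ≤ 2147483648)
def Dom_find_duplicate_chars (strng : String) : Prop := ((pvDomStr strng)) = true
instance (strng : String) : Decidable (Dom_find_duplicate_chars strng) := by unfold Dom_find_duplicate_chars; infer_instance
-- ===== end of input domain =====

-- B replaces A's single-pass stateful dict build with a dict comprehension over the
-- distinct chars, recomputing each char's positions by an inner scan (objective: alternative).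

-- ===== PORT A =====
def find_duplicate_chars (strng : String) : List (String × List String) :=
  ((PySem.List.enumerate (PySem.Str.lower strng).toList).foldl
    (fun mapping pc =>
      let char : String := String.ofList [pc.2]
      if mapping.contains char then
        -- mapping[char].append(str(pos)): key is present, so modify appends
        mapping.modify char [] (fun l => l ++ [PySem.Int.toStr pc.1])
      else
        mapping.insert char []) PySem.Dict.empty).items

-- ===== PORT B =====
def find_duplicate_chars_alt (strng : String) : List (String × List String) :=
  let s := (PySem.Str.lower strng).toList
  -- {c: [str(p) for p, ch in enumerate(s) if ch == c][1:] for c in dict.fromkeys(s)}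
  (PySem.List.dedup s).map (fun c =>
    (String.ofList [c],
     (((PySem.List.enumerate s).filter (fun pc => pc.2 == c)).map
       (fun pc => PySem.Int.toStr pc.1)).drop 1))

-- ===== PRECONDITION & SPEC =====
def Spec_find_duplicate_chars (strng : String) (out : List (String × List String)) : Prop := out = find_duplicate_chars_alt strng
instance (strng : String) (out : List (String × List String)) : Decidable (Spec_find_duplicate_chars strng out) := by unfold Spec_find_duplicate_chars; infer_instance

-- ===== CLAIM (what is proved, stated in full; the proofs are below) =====
def Claim_equal_find_duplicate_chars : Prop := ∀ (strng : String), Dom_find_duplicate_chars strng → Spec_find_duplicate_chars strng (find_duplicate_chars strng)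

-- ===== LEMMAS AND PROOFS =====

/-- A's loop body, rewritten as a single insert (used only in the proofs). -/
def pvStep (d : PySem.Dict String (List String)) (pc : Int × Char) : PySem.Dict String (List String) :=
  d.insert (String.ofList [pc.2])
    (if d.contains (String.ofList [pc.2])
     then d.getD (String.ofList [pc.2]) [] ++ [PySem.Int.toStr pc.1] else [])

theorem pv_stepA (d : PySem.Dict String (List String)) (pc : Int × Char) :
    (let char : String := String.ofList [pc.2]
     if d.contains char then d.modify char [] (fun l => l ++ [PySem.Int.toStr pc.1])
     else d.insert char []) = pvStep d pc := by
  by_cases h : d.contains (String.ofList [pc.2]) <;> simp [pvStep, h, PySem.Dict.modify]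

theorem pv_foldA_eq (l : List (Int × Char)) (d : PySem.Dict String (List String)) :
    l.foldl (fun mapping pc =>
        let char : String := String.ofList [pc.2]
        if mapping.contains char then mapping.modify char [] (fun l => l ++ [PySem.Int.toStr pc.1])
        else mapping.insert char []) d = l.foldl pvStep d :=
  PySem.List.foldl_congr_mem l _ _ d (fun acc x _ => pv_stepA acc x)

theorem pv_key_inj (c c' : Char) (h : String.ofList [c] = String.ofList [c']) : c = c' := by
  have := congrArg String.toList h
  simpa using this

theorem pv_ofList_map_aux (t : List Char) :
    ∀ (acc : PySem.Set Char),
      List.foldl PySem.Set.add (acc.map (fun c => String.ofList [c])) (t.map (fun c => String.ofList [c]))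
        = (List.foldl PySem.Set.add acc t).map (fun c => String.ofList [c]) := by
  induction t with
  | nil => intro acc; rfl
  | cons a t ih =>
    intro acc
    simp only [List.map_cons, List.foldl_cons]
    by_cases h : a ∈ acc
    · rw [PySem.Set.add_of_mem (List.mem_map.mpr ⟨a, h, rfl⟩), PySem.Set.add_of_mem h, ih]
    · have hm' : String.ofList [a] ∉ acc.map (fun c => String.ofList [c]) := by
        intro hm
        rcases List.mem_map.mp hm with ⟨b, hb, hab⟩
        exact h ((pv_key_inj b a hab) ▸ hb)
      rw [PySem.Set.add_of_not_mem hm', PySem.Set.add_of_not_mem h]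
      have hap : (acc.map (fun c => String.ofList [c]) ++ [String.ofList [a]])
          = (acc ++ [a]).map (fun c => String.ofList [c]) := by simp
      rw [hap]
      exact ih (acc ++ [a])

theorem pv_dedup_map_key (s : List Char) :
    PySem.List.dedup (s.map (fun c => String.ofList [c]))
      = (PySem.List.dedup s).map (fun c => String.ofList [c]) := by
  simp only [PySem.List.dedup_eq_ofList, PySem.Set.ofList]
  exact pv_ofList_map_aux s PySem.Set.empty

/-- Value of the fold at a single-char key. -/
theorem pv_getD_foldA (l : List (Int × Char)) (c : Char) :
    ∀ (d : PySem.Dict String (List String)),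
    (l.foldl pvStep d).getD (String.ofList [c]) [] =
      (if d.contains (String.ofList [c])
       then d.getD (String.ofList [c]) [] ++
         ((l.filter (fun pc => pc.2 == c)).map (fun pc => PySem.Int.toStr pc.1))
       else (((l.filter (fun pc => pc.2 == c)).map (fun pc => PySem.Int.toStr pc.1)).drop 1)) := by
  induction l with
  | nil =>
    intro d
    simp only [List.foldl_nil, List.filter_nil, List.map_nil, List.drop_nil]
    by_cases h : d.contains (String.ofList [c])
    · simp [h]
    · rw [if_neg h]
      exact PySem.Dict.getD_of_not_contains d [] (by simpa using h)
  | cons pc t ih =>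
    intro d
    simp only [List.foldl_cons]
    rw [ih (pvStep d pc)]
    by_cases hc : pc.2 = c
    · subst hc
      by_cases h : d.contains (String.ofList [pc.2])
      · simp [pvStep, h]
      · simp [pvStep, h]
    · have hkey : String.ofList [c] ≠ String.ofList [pc.2] := fun h => hc (pv_key_inj _ _ h).symm
      have hcont : (pvStep d pc).contains (String.ofList [c]) = d.contains (String.ofList [c]) := by
        rw [pvStep, PySem.Dict.contains_insert]
        simp [hkey]
      rw [hcont]
      by_cases h : d.contains (String.ofList [c])
      · rw [if_pos h, if_pos h, pvStep, PySem.Dict.getD_insert]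
        simp [hkey, hc]
      · simp [h, hc]

theorem pv_nodup_keys_foldA (l : List (Int × Char)) :
    ((l.foldl pvStep PySem.Dict.empty)).keys.Nodup :=
  PySem.Dict.nodup_keys_foldl_insert_key l (fun pc => String.ofList [pc.2]) _ _
    PySem.Dict.nodup_keys_empty

theorem pv_keys_foldA (l : List (Int × Char)) :
    (l.foldl pvStep PySem.Dict.empty).keys =
      PySem.List.dedup (l.map (fun pc => String.ofList [pc.2])) := by
  have hfun : pvStep = fun d pc => d.insert (String.ofList [pc.2])
      (if d.contains (String.ofList [pc.2])
       then d.getD (String.ofList [pc.2]) [] ++ [PySem.Int.toStr pc.1] else []) := rfl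
  rw [hfun, PySem.Dict.keys_foldl_insert_key, PySem.Dict.keys_empty,
    PySem.Set.update_eq_append_filter, PySem.List.dedup_eq_ofList]
  simp [PySem.Set.contains]

-- ===== VERDICT (by name: the statement is the Claim_ definition above) =====
set_option maxHeartbeats 800000 in
theorem find_duplicate_chars_spec : Claim_equal_find_duplicate_chars := by
  intro strng _
  unfold Spec_find_duplicate_chars find_duplicate_chars find_duplicate_chars_alt
  rw [pv_foldA_eq]
  set s := (PySem.Str.lower strng).toList with hs
  set l := PySem.List.enumerate s with hl
  set dA := l.foldl pvStep PySem.Dict.empty with hdA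
  rw [PySem.Dict.items_eq_map_keys dA (hdA ▸ pv_nodup_keys_foldA l) []]
  have hkeys : dA.keys = (PySem.List.dedup s).map (fun c => String.ofList [c]) := by
    rw [hdA, pv_keys_foldA]
    have hmap : l.map (fun pc => String.ofList [pc.2]) = s.map (fun c => String.ofList [c]) := by
      rw [hl, show (PySem.List.enumerate s).map (fun pc => String.ofList [pc.2]) =
        ((PySem.List.enumerate s).map (fun pc => pc.2)).map (fun c => String.ofList [c]) by
          rw [List.map_map]; rfl,
        PySem.List.map_snd_enumerate]
    rw [hmap, pv_dedup_map_key]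
  rw [hkeys, List.map_map]
  apply List.map_congr_left
  intro c _
  simp only [Function.comp]
  congr 1
  rw [hdA, pv_getD_foldA]
  rw [if_neg (by simp [PySem.Dict.contains_empty])]
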